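-- pv_equiv track=rewrite | github.com/zhao94254/fun | datastructre_algorithm/problem/p_list.py | sub_sum_zero
-- ===== SOURCE A (Python) =====
-- def sub_sum_zero(nums):
--     """和为0的子数组 思路 用一个map来保存之前"""
--     _map = {0:-1}
--     t = 0
--     for i, j in enumerate(nums):
--         t += j
--         if t in _map:
--             return [_map[t]+1, i]
--         _map[t] = i
--     return
-- ===== SOURCE B (Python) =====
-- def sub_sum_zero(nums):
--     """Find the first zero-sum subarray by a plain nested scan (no hash map)."""
--     total = 0
--     for end in range(len(nums)):
--         total += nums[end]
--         s = total  # s = sum(nums[start:end+1]) as start advances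
--         for start in range(end + 1):
--             if s == 0:
--                 return [start, end]
--             s -= nums[start]
--     return None
-- ===== Notes on version B (the rewrite author's own statement) =====
-- stated objective: alternative
-- what changed: Replaced the prefix-sum hash map with a nested scan: for each end index, a running sum walks start from 0 and returns the first zero-sum window; no dictionary is kept.
import Mathlib
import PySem

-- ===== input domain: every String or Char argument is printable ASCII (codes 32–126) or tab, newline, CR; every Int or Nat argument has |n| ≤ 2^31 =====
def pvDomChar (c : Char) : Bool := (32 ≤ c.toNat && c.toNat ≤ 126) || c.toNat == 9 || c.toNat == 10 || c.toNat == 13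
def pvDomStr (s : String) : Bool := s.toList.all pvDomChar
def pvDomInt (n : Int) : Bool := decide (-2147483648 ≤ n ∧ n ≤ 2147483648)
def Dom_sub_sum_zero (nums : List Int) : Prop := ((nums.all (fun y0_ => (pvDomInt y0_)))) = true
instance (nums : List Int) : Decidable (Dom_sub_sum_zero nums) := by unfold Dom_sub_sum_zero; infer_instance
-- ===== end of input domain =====

-- B replaces A's prefix-sum hash map by a nested start/end scan with a running sum (alternative algorithm, same results).

-- ===== PORT A =====
-- loop body of A: for i, j in enumerate(nums): t += j; if t in _map: return [_map[t]+1, i]; _map[t] = i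
def subSumZeroGo : List Int → Nat → Int → PySem.Dict Int Int → Option (List Int)
  | [], _, _, _ => none
  | j :: rest, i, t, m =>
    let t' := t + j
    match m.get? t' with
    | some v => some [v + 1, (i : Int)]
    | none => subSumZeroGo rest (i + 1) t' (m.insert t' (i : Int))

def sub_sum_zero (nums : List Int) : Option (List Int) :=
  subSumZeroGo nums 0 0 (PySem.Dict.empty.insert 0 (-1))

-- ===== PORT B =====
-- inner loop of B: for start in range(end+1): if s == 0: return [start, end]; s -= nums[start]
def subSumZeroInner (nums : List Int) (endIdx : Nat) (s : Int) (start : Nat) : Option (List Int) :=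
  if start ≤ endIdx then
    if s = 0 then some [(start : Int), (endIdx : Int)]
    else subSumZeroInner nums endIdx (s - nums.getD start 0) (start + 1)
  else none
termination_by endIdx + 1 - start

-- outer loop of B: for end in range(len(nums)): total += nums[end]; <inner loop>
def subSumZeroOuter (nums : List Int) (n : Nat) (total : Int) (endIdx : Nat) : Option (List Int) :=
  if endIdx < n then
    let total' := total + nums.getD endIdx 0
    match subSumZeroInner nums endIdx total' 0 with
    | some r => some r
    | none => subSumZeroOuter nums n total' (endIdx + 1)
  else none
termination_by n - endIdx

def sub_sum_zero_alt (nums : List Int) : Option (List Int) :=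
  subSumZeroOuter nums nums.length 0 0

-- ===== PRECONDITION & SPEC =====
def Spec_sub_sum_zero (nums : List Int) (out : Option (List Int)) : Prop := out = sub_sum_zero_alt nums
instance (nums : List Int) (out : Option (List Int)) : Decidable (Spec_sub_sum_zero nums out) := by unfold Spec_sub_sum_zero; infer_instance

-- ===== CLAIM (what is proved, stated in full; the proofs are below) =====
def Claim_equal_sub_sum_zero : Prop := ∀ (nums : List Int), Dom_sub_sum_zero nums → Spec_sub_sum_zero nums (sub_sum_zero nums)

-- ===== LEMMAS AND PROOFS =====

-- prefix sum of the first k elements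
def pfx (nums : List Int) (k : Nat) : Int := ((nums.take k).sum)

theorem pfx_zero (nums : List Int) : pfx nums 0 = 0 := rfl

theorem pfx_succ (nums : List Int) (k : Nat) (hk : k < nums.length) :
    pfx nums (k + 1) = pfx nums k + nums.getD k 0 := by
  unfold pfx
  rw [List.take_add_one, List.sum_append, List.getD_eq_getElem?_getD,
    List.getElem?_eq_getElem hk]
  simp

-- the inner loop finds the least start in [start, endIdx] whose window sums to 0
theorem inner_correct (nums : List Int) (endIdx : Nat) (hE : endIdx < nums.length) :
    ∀ start : Nat, start ≤ endIdx + 1 →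
    subSumZeroInner nums endIdx (pfx nums (endIdx + 1) - pfx nums start) start =
      ((List.range' start (endIdx + 1 - start)).find?
        (fun j => pfx nums j == pfx nums (endIdx + 1))).map
        (fun j => [(j : Int), (endIdx : Int)]) := by
  intro start hstart
  induction hfuel : endIdx + 1 - start generalizing start with
  | zero =>
      have h1 : start = endIdx + 1 := by omega
      subst h1
      rw [subSumZeroInner]
      simp
  | succ f ih =>
      have hlt : start ≤ endIdx := by omega
      rw [subSumZeroInner, if_pos hlt, List.range'_succ]
      by_cases hz : pfx nums (endIdx + 1) - pfx nums start = 0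
      · rw [if_pos hz, List.find?_cons_of_pos (by simp; omega)]
        simp
      · rw [if_neg hz, List.find?_cons_of_neg (by simp; omega)]
        have hsub : pfx nums (endIdx + 1) - pfx nums start - nums.getD start 0 =
            pfx nums (endIdx + 1) - pfx nums (start + 1) := by
          have := pfx_succ nums start (by omega)
          omega
        have hf : endIdx + 1 - (start + 1) = f := by omega
        rw [hsub]
        exact ih (start + 1) (by omega) hf

-- the dict invariant: m maps a prefix-sum value to (first index attaining it) - 1
def DictInv (nums : List Int) (i : Nat) (m : PySem.Dict Int Int) : Prop :=
  ∀ v : Int, m.get? v =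
    ((List.range (i + 1)).find? (fun k => pfx nums k == v)).map (fun k => (k : Int) - 1)

theorem main_lemma (nums : List Int) :
    ∀ (rest : List Int) (i : Nat) (m : PySem.Dict Int Int),
      rest = nums.drop i → DictInv nums i m →
      subSumZeroGo rest i (pfx nums i) m = subSumZeroOuter nums nums.length (pfx nums i) i := by
  intro rest
  induction rest with
  | nil =>
      intro i m hdrop _
      have hi : nums.length ≤ i := by
        have := congrArg List.length hdrop
        simp at this
        omega
      rw [subSumZeroGo, subSumZeroOuter, if_neg (by omega)]
  | cons j rest' ih =>
      intro i m hdrop hinv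
      have hi : i < nums.length := by
        by_contra h
        rw [List.drop_eq_nil_of_le (by omega)] at hdrop
        exact List.cons_ne_nil _ _ hdrop
      have hget : nums[i]? = some j := by
        have h0 : (List.drop i nums)[0]? = nums[i + 0]? := List.getElem?_drop
        rw [← hdrop] at h0
        simpa using h0.symm
      have hj : nums.getD i 0 = j := by
        rw [List.getD_eq_getElem?_getD, hget]
        rfl
      have hdrop' : rest' = nums.drop (i + 1) := by
        have h1 : nums.drop (i + 1) = (nums.drop i).drop 1 := by
          rw [List.drop_drop]
        rw [h1, ← hdrop]
        simp
      have ht' : pfx nums i + j = pfx nums (i + 1) := by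
        rw [pfx_succ nums i hi, hj]
      rw [subSumZeroGo, subSumZeroOuter, if_pos hi]
      simp only [hj, ht']
      have hinner := inner_correct nums i hi 0 (by omega)
      rw [pfx_zero, sub_zero, Nat.sub_zero, ← List.range_eq_range'] at hinner
      rw [hinner, hinv (pfx nums (i + 1))]
      cases hfind : (List.range (i + 1)).find? (fun k => pfx nums k == pfx nums (i + 1)) with
      | some k =>
          simp
      | none =>
          have hinv' : DictInv nums (i + 1) (m.insert (pfx nums (i + 1)) (i : Int)) := by
            intro v
            have hsplit : List.range (i + 1 + 1) = List.range (i + 1) ++ [i + 1] := by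
              rw [List.range_succ]
            rw [hsplit, List.find?_append]
            by_cases hv : v = pfx nums (i + 1)
            · subst hv
              rw [PySem.Dict.get?_insert_self, hfind]
              simp
            · rw [PySem.Dict.get?_insert_of_ne _ _ hv, hinv v]
              have hb : (pfx nums (i + 1) == v) = false := by
                simp
                exact fun h => hv h.symm
              simp [hb]
          exact ih (i + 1) (m.insert (pfx nums (i + 1)) (i : Int)) hdrop' hinv'

-- ===== VERDICT (by name: the statement is the Claim_ definition above) =====
theorem sub_sum_zero_spec : Claim_equal_sub_sum_zero := by
  intro nums _
  unfold Spec_sub_sum_zero sub_sum_zero sub_sum_zero_alt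
  have hinv : DictInv nums 0 (PySem.Dict.empty.insert 0 (-1)) := by
    intro v
    by_cases hv : v = 0
    · subst hv
      rw [PySem.Dict.get?_insert_self]
      simp [List.range_one, pfx]
    · rw [PySem.Dict.get?_insert_of_ne _ _ hv, PySem.Dict.get?_empty]
      have hb : (pfx nums 0 == v) = false := by
        simp [pfx]
        exact fun h => hv h.symm
      simp [List.range_one, hb]
  have := main_lemma nums nums 0 (PySem.Dict.empty.insert 0 (-1)) (by simp) hinv
  simpa [pfx] using this
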